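-- pv_equiv track=rewrite | github.com/MrNiceguy4-20/prodigy | compatibility_checker.py | _detect_gpu_family_and_limit
-- ===== SOURCE A (Python) =====
-- from typing import Any, Dict, Tuple, Optional
--
-- def _detect_gpu_family_and_limit(
--     gpus: Dict[str, Dict[str, Any]]
-- ) -> Tuple[str, Optional[str], Optional[str]]:
--     """
--     Returns:
--       gpu_family (string),
--       gpu_limit (max macOS version),
--       gpu_accel_warning (string or None)
--     """
--
--     if not gpus:
--         return "Unknown", None, None
--
--     # Use the first GPU for compatibility
--     gpu = list(gpus.values())[0]
--     name = (gpu.get("Name") or "").lower()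
--
--     # Intel iGPU
--     if "hd graphics 3000" in name:
--         return "Intel HD 3000", "High Sierra", None
--     if "hd graphics 4000" in name:
--         return "Intel HD 4000", "Ventura", None
--     if "uhd" in name or "iris" in name or "630" in name:
--         return "Intel UHD/Iris", "Sonoma", None
--
--     # NVIDIA
--     if "gtx" in name or "rtx" in name or "quadro" in name:
--         if any(k in name for k in ["750", "950", "960", "970", "980", "1050", "1060", "1070", "1080"]):
--             return (
--                 "NVIDIA Maxwell/Pascal",
--                 "High Sierra",
--                 "No hardware acceleration on macOS Mojave or newer.",
--             )
--         if any(k in name for k in ["640", "650", "660", "670", "680", "690", "710", "720", "730", "740"]):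
--             return "NVIDIA Kepler", "Monterey", None
--
--     # AMD
--     if "rx" in name:
--         if any(k in name for k in ["460", "470", "480", "560", "570", "580"]):
--             return "AMD Polaris", "Sonoma", None
--         if any(k in name for k in ["5500", "5600", "5700"]):
--             return "AMD Navi", "Sonoma", None
--         if any(k in name for k in ["6600", "6700", "6800", "6900"]):
--             return (
--                 "AMD RDNA2",
--                 "Sonoma",
--                 "Requires OCLP for full acceleration.",
--             )
--
--     return "Unknown", None, None
-- ===== SOURCE B (Python) =====
-- # Different algorithm: instead of testing each keyword with a substring scan of the
-- # name (A's if/elif chain of 'kw in name' checks), B makes ONE sliding-window pass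
-- # over the name, looking each window of the relevant lengths up in a hash set of
-- # all known keywords, and then classifies from the resulting matched-keyword set.
--
-- _INTEL = ("uhd", "iris", "630")
-- _NV = ("gtx", "rtx", "quadro")
-- _MAXWELL = ("750", "950", "960", "970", "980", "1050", "1060", "1070", "1080")
-- _KEPLER = ("640", "650", "660", "670", "680", "690", "710", "720", "730", "740")
-- _POLARIS = ("460", "470", "480", "560", "570", "580")
-- _NAVI = ("5500", "5600", "5700")
-- _RDNA2 = ("6600", "6700", "6800", "6900")
--
-- _KEYWORDS = frozenset(
--     ("hd graphics 3000", "hd graphics 4000", "rx")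
--     + _INTEL + _NV + _MAXWELL + _KEPLER + _POLARIS + _NAVI + _RDNA2
-- )
-- _LENS = (2, 3, 4, 6, 16)  # the distinct keyword lengths
--
--
-- def _match_keywords(name):
--     """One pass over the name: every window whose text is a known keyword is a hit."""
--     hits = set()
--     for i in range(len(name)):
--         for L in _LENS:
--             w = name[i:i + L]
--             if w in _KEYWORDS:
--                 hits.add(w)
--     return hits
--
--
-- def _classify(h):
--     """Decide family/limit/warning from the set of matched keywords."""
--     if "hd graphics 3000" in h:
--         return "Intel HD 3000", "High Sierra", None
--     if "hd graphics 4000" in h: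
--         return "Intel HD 4000", "Ventura", None
--     if any(k in h for k in _INTEL):
--         return "Intel UHD/Iris", "Sonoma", None
--     if any(k in h for k in _NV):
--         if any(k in h for k in _MAXWELL):
--             return (
--                 "NVIDIA Maxwell/Pascal",
--                 "High Sierra",
--                 "No hardware acceleration on macOS Mojave or newer.",
--             )
--         if any(k in h for k in _KEPLER):
--             return "NVIDIA Kepler", "Monterey", None
--     if "rx" in h:
--         if any(k in h for k in _POLARIS):
--             return "AMD Polaris", "Sonoma", None
--         if any(k in h for k in _NAVI):
--             return "AMD Navi", "Sonoma", None
--         if any(k in h for k in _RDNA2):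
--             return "AMD RDNA2", "Sonoma", "Requires OCLP for full acceleration."
--     return "Unknown", None, None
--
--
-- def _detect_gpu_family_and_limit(gpus):
--     if not gpus:
--         return "Unknown", None, None
--     name = (next(iter(gpus.values())).get("Name") or "").lower()
--     return _classify(_match_keywords(name))
-- ===== Notes on version B (the rewrite author's own statement) =====
-- stated objective: alternative
-- what changed: A tests each keyword with its own substring scan in a hard-coded if/elif chain; B makes one sliding-window pass over the name, looking windows of the keyword lengths up in a hash set of all keywords to build the matched-keyword set, then classifies from set membership.
import Mathlib
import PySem

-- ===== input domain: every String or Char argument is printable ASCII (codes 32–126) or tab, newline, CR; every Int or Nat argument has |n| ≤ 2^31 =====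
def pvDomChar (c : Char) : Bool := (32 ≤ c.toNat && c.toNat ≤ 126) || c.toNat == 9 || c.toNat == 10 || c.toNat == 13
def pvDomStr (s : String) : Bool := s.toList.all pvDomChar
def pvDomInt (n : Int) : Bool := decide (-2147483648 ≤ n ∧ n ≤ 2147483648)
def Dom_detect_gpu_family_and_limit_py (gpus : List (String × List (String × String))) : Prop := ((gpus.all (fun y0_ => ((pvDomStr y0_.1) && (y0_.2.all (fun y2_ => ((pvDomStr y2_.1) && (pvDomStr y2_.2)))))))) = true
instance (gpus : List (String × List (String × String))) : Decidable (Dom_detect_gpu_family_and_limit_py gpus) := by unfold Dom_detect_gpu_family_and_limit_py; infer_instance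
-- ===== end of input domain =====

-- B replaces A's per-keyword substring scans (if/elif chain) by one sliding-window pass
-- over the name that looks windows up in a keyword set, then classifies from the matched
-- set (objective: alternative); return-value equivalence is proved on all inputs.

-- ===== PORT A =====
-- literal transliteration of A's if-chain
def pvClassifyA (name : String) : String × Option String × Option String :=
  if PySem.Str.isIn "hd graphics 3000" name then ("Intel HD 3000", some "High Sierra", none)
  else if PySem.Str.isIn "hd graphics 4000" name then ("Intel HD 4000", some "Ventura", none)
  else if PySem.Str.isIn "uhd" name || PySem.Str.isIn "iris" name || PySem.Str.isIn "630" name then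
    ("Intel UHD/Iris", some "Sonoma", none)
  else if PySem.Str.isIn "gtx" name || PySem.Str.isIn "rtx" name || PySem.Str.isIn "quadro" name then
    (if (["750", "950", "960", "970", "980", "1050", "1060", "1070", "1080"] : List String).any
        (fun k => PySem.Str.isIn k name) then
      ("NVIDIA Maxwell/Pascal", some "High Sierra",
        some "No hardware acceleration on macOS Mojave or newer.")
    else if (["640", "650", "660", "670", "680", "690", "710", "720", "730", "740"] : List String).any
        (fun k => PySem.Str.isIn k name) then
      ("NVIDIA Kepler", some "Monterey", none)
    else if PySem.Str.isIn "rx" name then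
      (if (["460", "470", "480", "560", "570", "580"] : List String).any
          (fun k => PySem.Str.isIn k name) then ("AMD Polaris", some "Sonoma", none)
      else if (["5500", "5600", "5700"] : List String).any
          (fun k => PySem.Str.isIn k name) then ("AMD Navi", some "Sonoma", none)
      else if (["6600", "6700", "6800", "6900"] : List String).any
          (fun k => PySem.Str.isIn k name) then
        ("AMD RDNA2", some "Sonoma", some "Requires OCLP for full acceleration.")
      else ("Unknown", none, none))
    else ("Unknown", none, none))
  else if PySem.Str.isIn "rx" name then
    (if (["460", "470", "480", "560", "570", "580"] : List String).any
        (fun k => PySem.Str.isIn k name) then ("AMD Polaris", some "Sonoma", none)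
    else if (["5500", "5600", "5700"] : List String).any
        (fun k => PySem.Str.isIn k name) then ("AMD Navi", some "Sonoma", none)
    else if (["6600", "6700", "6800", "6900"] : List String).any
        (fun k => PySem.Str.isIn k name) then
      ("AMD RDNA2", some "Sonoma", some "Requires OCLP for full acceleration.")
    else ("Unknown", none, none))
  else ("Unknown", none, none)

def detect_gpu_family_and_limit_py (gpus : List (String × List (String × String))) : String × Option String × Option String :=
  if gpus.isEmpty then ("Unknown", none, none)
  else
    let gpu := ((PySem.Dict.ofList gpus).values).headD []
    let name := PySem.Str.lower ((PySem.Dict.ofList gpu).getD "Name" "")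
    pvClassifyA name

-- ===== PORT B =====
-- Source B's keyword groups (strings ported through List Char, the PySem string bridge)
def pvIntel : List (List Char) := ["uhd".toList, "iris".toList, "630".toList]
def pvNv : List (List Char) := ["gtx".toList, "rtx".toList, "quadro".toList]
def pvMaxwell : List (List Char) :=
  ["750".toList, "950".toList, "960".toList, "970".toList, "980".toList,
   "1050".toList, "1060".toList, "1070".toList, "1080".toList]
def pvKepler : List (List Char) :=
  ["640".toList, "650".toList, "660".toList, "670".toList, "680".toList,
   "690".toList, "710".toList, "720".toList, "730".toList, "740".toList]
def pvPolaris : List (List Char) :=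
  ["460".toList, "470".toList, "480".toList, "560".toList, "570".toList, "580".toList]
def pvNavi : List (List Char) := ["5500".toList, "5600".toList, "5700".toList]
def pvRdna2 : List (List Char) := ["6600".toList, "6700".toList, "6800".toList, "6900".toList]
-- _KEYWORDS: all keywords, and _LENS: their distinct lengths
def pvKw : List (List Char) :=
  ["hd graphics 3000".toList, "hd graphics 4000".toList, "rx".toList] ++
    pvIntel ++ pvNv ++ pvMaxwell ++ pvKepler ++ pvPolaris ++ pvNavi ++ pvRdna2
def pvLens : List Nat := [2, 3, 4, 6, 16]

-- Source B's _match_keywords: one pass, every window that is a known keyword is a hit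
def pvHits (s : List Char) : PySem.Set (List Char) :=
  (List.range s.length).foldl
    (fun hits i =>
      pvLens.foldl
        (fun hits L =>
          let w := (s.drop i).take L          -- name[i:i+L]
          if pvKw.contains w then PySem.Set.add hits w else hits)
        hits)
    PySem.Set.empty

-- Source B's _classify: decision from the matched-keyword set (early returns become nesting)
def pvClassify (h : PySem.Set (List Char)) : String × Option String × Option String :=
  if PySem.Set.contains h "hd graphics 3000".toList then ("Intel HD 3000", some "High Sierra", none)
  else if PySem.Set.contains h "hd graphics 4000".toList then ("Intel HD 4000", some "Ventura", none)
  else if pvIntel.any (fun k => PySem.Set.contains h k) then ("Intel UHD/Iris", some "Sonoma", none)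
  else
    -- the code after the NVIDIA block (reached by fall-through in Source B)
    let rest :=
      if PySem.Set.contains h "rx".toList then
        if pvPolaris.any (fun k => PySem.Set.contains h k) then ("AMD Polaris", some "Sonoma", none)
        else if pvNavi.any (fun k => PySem.Set.contains h k) then ("AMD Navi", some "Sonoma", none)
        else if pvRdna2.any (fun k => PySem.Set.contains h k) then
          ("AMD RDNA2", some "Sonoma", some "Requires OCLP for full acceleration.")
        else ("Unknown", none, none)
      else ("Unknown", none, none)
    if pvNv.any (fun k => PySem.Set.contains h k) then
      if pvMaxwell.any (fun k => PySem.Set.contains h k) then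
        ("NVIDIA Maxwell/Pascal", some "High Sierra",
          some "No hardware acceleration on macOS Mojave or newer.")
      else if pvKepler.any (fun k => PySem.Set.contains h k) then ("NVIDIA Kepler", some "Monterey", none)
      else rest
    else rest

def detect_gpu_family_and_limit_py_alt (gpus : List (String × List (String × String))) : String × Option String × Option String :=
  if gpus.isEmpty then ("Unknown", none, none)
  else
    let gpu := ((PySem.Dict.ofList gpus).values).headD []
    let name := PySem.Str.lower ((PySem.Dict.ofList gpu).getD "Name" "")
    pvClassify (pvHits name.toList)

-- ===== PRECONDITION & SPEC =====
def Spec_detect_gpu_family_and_limit_py (gpus : List (String × List (String × String))) (out : String × Option String × Option String) : Prop := out = detect_gpu_family_and_limit_py_alt gpus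
instance (gpus : List (String × List (String × String))) (out : String × Option String × Option String) : Decidable (Spec_detect_gpu_family_and_limit_py gpus out) := by unfold Spec_detect_gpu_family_and_limit_py; infer_instance

-- ===== CLAIM (what is proved, stated in full; the proofs are below) =====
def Claim_equal_detect_gpu_family_and_limit_py : Prop := ∀ (gpus : List (String × List (String × String))), Dom_detect_gpu_family_and_limit_py gpus → Spec_detect_gpu_family_and_limit_py gpus (detect_gpu_family_and_limit_py gpus)

-- ===== LEMMAS AND PROOFS =====

-- membership in a fold whose step adds exactly the elements satisfying C
theorem pv_mem_foldl_step {β : Type} (step : PySem.Set (List Char) → β → PySem.Set (List Char))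
    (C : β → List Char → Prop)
    (hstep : ∀ acc x k, k ∈ step acc x ↔ k ∈ acc ∨ C x k) :
    ∀ (l : List β) (acc : PySem.Set (List Char)) (k : List Char),
      k ∈ l.foldl step acc ↔ k ∈ acc ∨ ∃ x ∈ l, C x k := by
  intro l
  induction l with
  | nil => intro acc k; simp
  | cons x xs ih =>
    intro acc k
    simp only [List.foldl_cons, ih, hstep, List.mem_cons]
    constructor
    · rintro ((h | h) | ⟨y, hy, hC⟩)
      · exact Or.inl h
      · exact Or.inr ⟨x, Or.inl rfl, h⟩
      · exact Or.inr ⟨y, Or.inr hy, hC⟩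
    · rintro (h | ⟨y, (rfl | hy), hC⟩)
      · exact Or.inl (Or.inl h)
      · exact Or.inl (Or.inr hC)
      · exact Or.inr ⟨y, hy, hC⟩

-- characterisation of the hit set: exactly the keywords occurring as a window
theorem pv_mem_hits (s : List Char) (k : List Char) :
    k ∈ pvHits s ↔
      ∃ i ∈ List.range s.length, ∃ L ∈ pvLens,
        pvKw.contains ((s.drop i).take L) = true ∧ (s.drop i).take L = k := by
  have hstep2 : ∀ (i : Nat) (acc : PySem.Set (List Char)) (L : Nat) (k : List Char),
      k ∈ (fun hits L =>
            let w := (s.drop i).take L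
            if pvKw.contains w then PySem.Set.add hits w else hits) acc L
        ↔ k ∈ acc ∨ (pvKw.contains ((s.drop i).take L) = true ∧ (s.drop i).take L = k) := by
    intro i acc L k
    by_cases hw : (s.drop i).take L ∈ pvKw
    · simp [hw, PySem.Set.mem_add, eq_comm]
    · simp [hw]
  have hstep1 : ∀ (acc : PySem.Set (List Char)) (i : Nat) (k : List Char),
      k ∈ (fun hits i =>
            pvLens.foldl (fun hits L =>
              let w := (s.drop i).take L
              if pvKw.contains w then PySem.Set.add hits w else hits) hits) acc i
        ↔ k ∈ acc ∨ ∃ L ∈ pvLens,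
            pvKw.contains ((s.drop i).take L) = true ∧ (s.drop i).take L = k := by
    intro acc i k
    exact pv_mem_foldl_step _ _ (hstep2 i) pvLens acc k
  have houter := pv_mem_foldl_step _ _ hstep1 (List.range s.length) PySem.Set.empty k
  simpa [pvHits] using houter

-- a keyword is a hit exactly when it occurs as a substring of the name
theorem pv_contains_hits (name : String) (kw : String)
    (h : kw.toList ∈ pvKw ∧ kw.toList ≠ [] ∧ kw.toList.length ∈ pvLens) :
    PySem.Set.contains (pvHits name.toList) kw.toList = PySem.Str.isIn kw name := by
  obtain ⟨hmem, hne, hlen⟩ := h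
  rw [Bool.eq_iff_iff, PySem.Str.isIn_iff_infix]
  rw [show (PySem.Set.contains (pvHits name.toList) kw.toList = true) ↔ kw.toList ∈ pvHits name.toList
    from by simp [PySem.Set.contains, List.contains_eq_mem]]
  rw [pv_mem_hits]
  constructor
  · rintro ⟨i, _, L, _, _, hw⟩
    exact (hw ▸ (List.take_prefix L (name.toList.drop i)).isInfix).trans
      (List.drop_suffix i name.toList).isInfix
  · rintro ⟨t, r, hs⟩
    refine ⟨t.length, ?_, kw.toList.length, hlen, ?_⟩
    · have : name.toList.length = t.length + (kw.toList.length + r.length) := by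
        rw [← hs]; simp
      have hk : 0 < kw.toList.length := List.length_pos_iff.mpr hne
      simp only [List.mem_range]; omega
    · have hdrop : name.toList.drop t.length = kw.toList ++ r := by
        rw [← hs, List.append_assoc, List.drop_left]
      rw [hdrop, List.take_left]
      exact ⟨by simpa using hmem, rfl⟩

-- the decision over the hit set equals A's if-chain
theorem pv_classify_eq (name : String) : pvClassify (pvHits name.toList) = pvClassifyA name := by
  unfold pvClassify pvClassifyA pvIntel pvNv pvMaxwell pvKepler pvPolaris pvNavi pvRdna2
  simp only [List.any_cons, List.any_nil, Bool.or_false]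
  rw [pv_contains_hits name "hd graphics 3000" (by decide)]
  rw [pv_contains_hits name "hd graphics 4000" (by decide)]
  rw [pv_contains_hits name "uhd" (by decide)]
  rw [pv_contains_hits name "iris" (by decide)]
  rw [pv_contains_hits name "630" (by decide)]
  rw [pv_contains_hits name "gtx" (by decide)]
  rw [pv_contains_hits name "rtx" (by decide)]
  rw [pv_contains_hits name "quadro" (by decide)]
  rw [pv_contains_hits name "rx" (by decide)]
  rw [pv_contains_hits name "750" (by decide)]
  rw [pv_contains_hits name "950" (by decide)]
  rw [pv_contains_hits name "960" (by decide)]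
  rw [pv_contains_hits name "970" (by decide)]
  rw [pv_contains_hits name "980" (by decide)]
  rw [pv_contains_hits name "1050" (by decide)]
  rw [pv_contains_hits name "1060" (by decide)]
  rw [pv_contains_hits name "1070" (by decide)]
  rw [pv_contains_hits name "1080" (by decide)]
  rw [pv_contains_hits name "640" (by decide)]
  rw [pv_contains_hits name "650" (by decide)]
  rw [pv_contains_hits name "660" (by decide)]
  rw [pv_contains_hits name "670" (by decide)]
  rw [pv_contains_hits name "680" (by decide)]
  rw [pv_contains_hits name "690" (by decide)]
  rw [pv_contains_hits name "710" (by decide)]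
  rw [pv_contains_hits name "720" (by decide)]
  rw [pv_contains_hits name "730" (by decide)]
  rw [pv_contains_hits name "740" (by decide)]
  rw [pv_contains_hits name "460" (by decide)]
  rw [pv_contains_hits name "470" (by decide)]
  rw [pv_contains_hits name "480" (by decide)]
  rw [pv_contains_hits name "560" (by decide)]
  rw [pv_contains_hits name "570" (by decide)]
  rw [pv_contains_hits name "580" (by decide)]
  rw [pv_contains_hits name "5500" (by decide)]
  rw [pv_contains_hits name "5600" (by decide)]
  rw [pv_contains_hits name "5700" (by decide)]
  rw [pv_contains_hits name "6600" (by decide)]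
  rw [pv_contains_hits name "6700" (by decide)]
  rw [pv_contains_hits name "6800" (by decide)]
  rw [pv_contains_hits name "6900" (by decide)]
  generalize PySem.Str.isIn "hd graphics 3000" name = c1
  generalize PySem.Str.isIn "hd graphics 4000" name = c2
  generalize PySem.Str.isIn "uhd" name = u
  generalize PySem.Str.isIn "iris" name = i
  generalize PySem.Str.isIn "630" name = s630
  generalize PySem.Str.isIn "gtx" name = g
  generalize PySem.Str.isIn "rtx" name = r
  generalize PySem.Str.isIn "quadro" name = q
  generalize PySem.Str.isIn "rx" name = rx
  cases c1 <;> cases c2 <;> cases u <;> cases i <;> cases s630 <;>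
    cases g <;> cases r <;> cases q <;> cases rx <;> simp

-- ===== VERDICT (by name: the statement is the Claim_ definition above) =====
theorem detect_gpu_family_and_limit_py_spec : Claim_equal_detect_gpu_family_and_limit_py := by
  intro gpus _
  unfold Spec_detect_gpu_family_and_limit_py detect_gpu_family_and_limit_py detect_gpu_family_and_limit_py_alt
  by_cases h : gpus.isEmpty
  · simp [h]
  · simp only [if_neg h]
    exact (pv_classify_eq _).symm
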